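-- pv_equiv track=rewrite | github.com/PaulSemrauBoughton/PythonModule | Coursework_Final/Coursework FINAL.py | is_in_mill
-- ===== SOURCE A (Python) =====
-- def is_in_mill(g, i):
--     """
--     Determines if placing a counter at position i creates a
--     mill (3 in a row) for the active player.
--
--     Parameters
--     ----------
--     g : list
--         The game state.
--     i : integer
--         Position on the board.
--
--     Returns
--     -------
--     boolean
--         Returns True if placing the counter at i creates a mill
--         for the active player, False if it does not.
--
--     """
--     mills = [[0, 1, 2],                     #creates list of possible mills.
--              [3, 4, 5],
--              [6, 7, 8],
--              [9, 10, 11],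
--              [12, 13, 14],
--              [15, 16, 17],
--              [18, 19, 20],
--              [21, 22, 23],
--              [0, 9, 21],
--              [3, 10, 18],
--              [6, 11, 15],
--              [1, 4, 7],
--              [16, 19, 22],
--              [8, 12, 17],
--              [5, 13, 20],
--              [2, 14, 23]
--              ]
--
--     if i>23 or i<0:
--         return -1
--     if g[0][i]==0:
--         return -1
--     else:
--         for mill in mills:
--             if i in mill:
--                 lst = [index for index, e in enumerate(g[0]) if e == g[0][i]]   #create list with elements of g[0] that are equal to value of g[0][i].
--                 if all(x in lst for x in mill):   #checks if all elements in mill are present in the temporary list "lst"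
--                     return g[0][i]
--             else:
--                 pass
--         return 0
-- ===== SOURCE B (Python) =====
-- # Every board position lies in exactly one row-of-three and one column mill:
-- # the row mill is computed arithmetically (positions are laid out in
-- # consecutive triples), the column mill comes from a fixed lookup table.
-- _COLUMN = {0: (0, 9, 21), 9: (0, 9, 21), 21: (0, 9, 21),
--            3: (3, 10, 18), 10: (3, 10, 18), 18: (3, 10, 18),
--            6: (6, 11, 15), 11: (6, 11, 15), 15: (6, 11, 15),
--            1: (1, 4, 7), 4: (1, 4, 7), 7: (1, 4, 7),
--            16: (16, 19, 22), 19: (16, 19, 22), 22: (16, 19, 22),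
--            8: (8, 12, 17), 12: (8, 12, 17), 17: (8, 12, 17),
--            5: (5, 13, 20), 13: (5, 13, 20), 20: (5, 13, 20),
--            2: (2, 14, 23), 14: (2, 14, 23), 23: (2, 14, 23)}
--
--
-- def is_in_mill(g, i):
--     if i > 23 or i < 0:
--         return -1
--     row = g[0]
--     v = row[i]
--     if v == 0:
--         return -1
--     b = 3 * (i // 3)
--     if row[b] == v and row[b + 1] == v and row[b + 2] == v:
--         return v
--     x, y, z = _COLUMN[i]
--     if row[x] == v and row[y] == v and row[z] == v:
--         return v
--     return 0
-- ===== Notes on version B (the rewrite author's own statement) =====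
-- stated objective: alternative
-- what changed: A scans all 16 mills, rebuilding the full index list of g[0] and membership-testing for each; B uses the board layout directly: the row mill of i is 3*(i//3)..+2 by arithmetic and the column mill is a constant table lookup, so exactly two triples are compared cell-by-cell. Pre_ additionally excludes boards with fewer than 24 cells (for on-board i): there A's membership test silently treats missing cells as non-matching while B's direct indexing raises IndexError.
-- outside the precondition, e.g. on is_in_mill([[1, 1]], 0): A returns 0, B raises IndexError
import Mathlib
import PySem

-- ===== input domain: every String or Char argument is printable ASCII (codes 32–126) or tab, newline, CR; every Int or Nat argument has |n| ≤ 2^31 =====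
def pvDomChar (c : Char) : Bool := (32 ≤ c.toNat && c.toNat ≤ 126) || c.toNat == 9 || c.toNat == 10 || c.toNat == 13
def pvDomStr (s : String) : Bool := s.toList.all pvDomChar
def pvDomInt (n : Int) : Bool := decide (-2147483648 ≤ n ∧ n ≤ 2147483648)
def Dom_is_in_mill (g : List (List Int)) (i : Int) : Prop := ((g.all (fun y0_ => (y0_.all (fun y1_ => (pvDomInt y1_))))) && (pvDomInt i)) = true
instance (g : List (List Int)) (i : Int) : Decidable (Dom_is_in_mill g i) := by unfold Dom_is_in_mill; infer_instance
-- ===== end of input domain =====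

-- B replaces A's scan over all 16 mills (each rebuilding the index list of g[0] and membership-testing)
-- by the board layout itself: the row mill of i is 3*(i//3)..+2 by arithmetic, the column mill is a
-- constant table lookup; exactly two triples are compared cell by cell (objective: alternative).

-- ===== PORT A =====
-- mills = [...] (A's local table)
def millTable : List (List Int) :=
  [[0, 1, 2], [3, 4, 5], [6, 7, 8], [9, 10, 11], [12, 13, 14], [15, 16, 17],
   [18, 19, 20], [21, 22, 23], [0, 9, 21], [3, 10, 18], [6, 11, 15], [1, 4, 7],
   [16, 19, 22], [8, 12, 17], [5, 13, 20], [2, 14, 23]]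

-- lst = [index for index, e in enumerate(g[0]) if e == g[0][i]]
def lstA (row : List Int) (v : Int) : List Int :=
  (PySem.List.enumerate row).filterMap (fun p => if p.2 = v then some p.1 else none)

-- A's for-mill loop (early return g[0][i] on a complete mill, else 0)
def loopA (row : List Int) (v i : Int) : List (List Int) → Int
  | [] => 0
  | mill :: rest =>
      if mill.contains i then
        if mill.all (fun x => (lstA row v).contains x) then v else loopA row v i rest
      else loopA row v i rest

def is_in_mill (g : List (List Int)) (i : Int) : Int :=
  if i > 23 || i < 0 then -1
  else
    match PySem.List.pyGet? g 0 with
    | none => -2                                  -- g[0] raises IndexError; excluded by Pre_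
    | some row =>
      match PySem.List.pyGet? row i with
      | none => -2                                -- g[0][i] raises IndexError; excluded by Pre_
      | some v => if v == 0 then -1 else loopA row v i millTable

-- ===== PORT B =====
-- _COLUMN: the fixed position -> column-mill table of Source B
def columnTable : PySem.Dict Int (Int × Int × Int) :=
  PySem.Dict.ofList
    [(0, (0, 9, 21)), (9, (0, 9, 21)), (21, (0, 9, 21)),
     (3, (3, 10, 18)), (10, (3, 10, 18)), (18, (3, 10, 18)),
     (6, (6, 11, 15)), (11, (6, 11, 15)), (15, (6, 11, 15)),
     (1, (1, 4, 7)), (4, (1, 4, 7)), (7, (1, 4, 7)),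
     (16, (16, 19, 22)), (19, (16, 19, 22)), (22, (16, 19, 22)),
     (8, (8, 12, 17)), (12, (8, 12, 17)), (17, (8, 12, 17)),
     (5, (5, 13, 20)), (13, (5, 13, 20)), (20, (5, 13, 20)),
     (2, (2, 14, 23)), (14, (2, 14, 23)), (23, (2, 14, 23))]

-- row[p] == v; exact when 0 ≤ p < len(row), which Pre_ guarantees for every index B uses
def cellEq (row : List Int) (p v : Int) : Bool := PySem.List.pyGet? row p == some v

def is_in_mill_alt (g : List (List Int)) (i : Int) : Int :=
  if i > 23 || i < 0 then -1
  else
    match PySem.List.pyGet? g 0 with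
    | none => -2                                  -- g[0] raises IndexError; excluded by Pre_
    | some row =>
      match PySem.List.pyGet? row i with
      | none => -2                                -- row[i] raises IndexError; excluded by Pre_
      | some v =>
        if v == 0 then -1
        else
          let b := 3 * PySem.Int.floordiv i 3
          if cellEq row b v && cellEq row (b + 1) v && cellEq row (b + 2) v then v
          else
            match columnTable.get? i with
            | none => -2                          -- KeyError; unreachable for 0 ≤ i ≤ 23
            | some (x, y, z) =>
              if cellEq row x v && cellEq row y v && cellEq row z v then v else 0

-- ===== PRECONDITION & SPEC =====
-- Pre_ excludes, for on-board i (0 ≤ i ≤ 23), the inputs where g[0] raises (g empty) and boards with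
-- fewer than 24 cells: there A raises once i ≥ len(g[0]), and where i < len(g[0]) < 24 A's membership
-- test still returns (treating missing cells as non-matching) while B's direct indexing raises IndexError.
def Pre_is_in_mill (g : List (List Int)) (i : Int) : Prop :=
  (0 ≤ i ∧ i ≤ 23) → (g ≠ [] ∧ (24 : Int) ≤ ((g.headD []).length : Int))
instance (g : List (List Int)) (i : Int) : Decidable (Pre_is_in_mill g i) := by
  unfold Pre_is_in_mill; infer_instance
def pvWitness_is_in_mill : List (List Int) × Int :=
  ([[1, 1, 1, 0, 0, 0, 0, 0, 0, 0, 0, 0, 0, 0, 0, 0, 0, 0, 0, 0, 0, 0, 0, 0]], 1)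

def Spec_is_in_mill (g : List (List Int)) (i : Int) (out : Int) : Prop := out = is_in_mill_alt g i
instance (g : List (List Int)) (i : Int) (out : Int) : Decidable (Spec_is_in_mill g i out) := by unfold Spec_is_in_mill; infer_instance

-- ===== CLAIM (what is proved, stated in full; the proofs are below) =====
def Claim_equal_is_in_mill : Prop := ∀ (g : List (List Int)) (i : Int), Dom_is_in_mill g i → Pre_is_in_mill g i → Spec_is_in_mill g i (is_in_mill g i)

-- ===== LEMMAS AND PROOFS =====

-- proof-only reformulation of A's loop: the mills not containing i are skipped up front
def loopF (row : List Int) (v : Int) : List (List Int) → Int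
  | [] => 0
  | mill :: rest =>
      if mill.all (fun x => (lstA row v).contains x) then v else loopF row v rest

theorem loopA_eq_loopF (row : List Int) (v i : Int) (ms : List (List Int)) :
    loopA row v i ms = loopF row v (ms.filter (fun m => m.contains i)) := by
  induction ms with
  | nil => rfl
  | cons m rest ih =>
      by_cases hm : m.contains i = true
      · simp only [loopA, hm, if_true, List.filter_cons, loopF, ih]
      · simp only [loopA, hm, Bool.false_eq_true, if_false, List.filter_cons, ih]

-- membership in A's index list lst, for an in-range index, is B's direct cell comparison
theorem contains_lstA (row : List Int) (v x : Int) (h0 : 0 ≤ x) (hx : x < (row.length : Int)) :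
    (lstA row v).contains x = cellEq row x v := by
  rw [Bool.eq_iff_iff]
  simp only [lstA, cellEq, List.contains_eq_mem, List.mem_filterMap,
    PySem.List.mem_enumerate_iff, beq_iff_eq, decide_eq_true_eq]
  constructor
  · rintro ⟨p, ⟨k, hk, rfl⟩, hif⟩
    split_ifs at hif with hv
    · simp only [Option.some.injEq] at hif
      rw [PySem.List.pyGet?_of_nonneg row (by omega)]
      have hxk : x.toNat = k := by omega
      rw [hxk, List.getElem?_eq_getElem hk]
      simpa using hv
  · intro hget
    rw [PySem.List.pyGet?_of_nonneg row h0] at hget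
    have hklen : x.toNat < row.length := by omega
    rw [List.getElem?_eq_getElem hklen] at hget
    have hv : row[x.toNat] = v := by simpa using hget
    refine ⟨((0 : Int) + (x.toNat : Nat), row[x.toNat]), ⟨x.toNat, hklen, rfl⟩, ?_⟩
    rw [if_pos hv]
    simp only [Option.some.injEq]
    omega

-- loopF on the two mills of a position, rewritten to B's direct comparisons
theorem loopF_two (r : List Int) (v : Int) (a b c x y z : Int)
    (hc : ∀ p : Int, 0 ≤ p → p < 24 → (lstA r v).contains p = cellEq r p v)
    (hb : 0 ≤ a ∧ a < 24 ∧ 0 ≤ b ∧ b < 24 ∧ 0 ≤ c ∧ c < 24 ∧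
          0 ≤ x ∧ x < 24 ∧ 0 ≤ y ∧ y < 24 ∧ 0 ≤ z ∧ z < 24) :
    loopF r v [[a, b, c], [x, y, z]] =
      (if cellEq r a v && cellEq r b v && cellEq r c v then v
       else if cellEq r x v && cellEq r y v && cellEq r z v then v else 0) := by
  obtain ⟨h1, h2, h3, h4, h5, h6, h7, h8, h9, h10, h11, h12⟩ := hb
  simp only [loopF, List.all_cons, List.all_nil, Bool.and_true,
    hc a h1 h2, hc b h3 h4, hc c h5 h6, hc x h7 h8, hc y h9 h10, hc z h11 h12,
    Bool.and_assoc]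

-- ===== VERDICT (by name: the statement is the Claim_ definition above) =====
theorem is_in_mill_spec : Claim_equal_is_in_mill := by
  intro g i _dom hpre
  unfold Spec_is_in_mill is_in_mill is_in_mill_alt
  by_cases hout : (i > 23 || i < 0) = true
  · simp only [hout, if_true]
  · simp only [hout, Bool.false_eq_true, if_false]
    have hi : 0 ≤ i ∧ i ≤ 23 := by simp at hout; omega
    obtain ⟨hg, hlen⟩ := hpre hi
    obtain ⟨r, t, rfl⟩ : ∃ r t, g = r :: t := by
      cases g with
      | nil => exact absurd rfl hg
      | cons r t => exact ⟨r, t, rfl⟩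
    simp only [List.headD_cons] at hlen
    have hilen : i.toNat < r.length := by omega
    simp only [PySem.List.pyGet?_zero_cons, PySem.List.pyGet?_of_nonneg r hi.1,
      List.getElem?_eq_getElem hilen]
    set v := r[i.toNat] with hv
    by_cases hv0 : (v == 0) = true
    · simp only [hv0, if_true]
    · simp only [hv0, Bool.false_eq_true, if_false]
      rw [loopA_eq_loopF]
      clear_value v
      clear hv hv0 hilen _dom hout
      have hc : ∀ p : Int, 0 ≤ p → p < 24 → (lstA r v).contains p = cellEq r p v :=
        fun p h0 h24 => contains_lstA r v p h0 (by omega)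
      obtain ⟨hi0, hi23⟩ := hi
      interval_cases i
      · rw [show millTable.filter (fun m => m.contains (0:Int)) = [[0,1,2],[0,9,21]] from by decide,
            loopF_two r v 0 1 2 0 9 21 hc (by norm_num)]
        norm_num [show PySem.Int.floordiv (0:Int) 3 = 0 from by decide,
                  show columnTable.get? (0:Int) = some (0,9,21) from by decide]
      · rw [show millTable.filter (fun m => m.contains (1:Int)) = [[0,1,2],[1,4,7]] from by decide,
            loopF_two r v 0 1 2 1 4 7 hc (by norm_num)]
        norm_num [show PySem.Int.floordiv (1:Int) 3 = 0 from by decide,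
                  show columnTable.get? (1:Int) = some (1,4,7) from by decide]
      · rw [show millTable.filter (fun m => m.contains (2:Int)) = [[0,1,2],[2,14,23]] from by decide,
            loopF_two r v 0 1 2 2 14 23 hc (by norm_num)]
        norm_num [show PySem.Int.floordiv (2:Int) 3 = 0 from by decide,
                  show columnTable.get? (2:Int) = some (2,14,23) from by decide]
      · rw [show millTable.filter (fun m => m.contains (3:Int)) = [[3,4,5],[3,10,18]] from by decide,
            loopF_two r v 3 4 5 3 10 18 hc (by norm_num)]
        norm_num [show PySem.Int.floordiv (3:Int) 3 = 1 from by decide,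
                  show columnTable.get? (3:Int) = some (3,10,18) from by decide]
      · rw [show millTable.filter (fun m => m.contains (4:Int)) = [[3,4,5],[1,4,7]] from by decide,
            loopF_two r v 3 4 5 1 4 7 hc (by norm_num)]
        norm_num [show PySem.Int.floordiv (4:Int) 3 = 1 from by decide,
                  show columnTable.get? (4:Int) = some (1,4,7) from by decide]
      · rw [show millTable.filter (fun m => m.contains (5:Int)) = [[3,4,5],[5,13,20]] from by decide,
            loopF_two r v 3 4 5 5 13 20 hc (by norm_num)]
        norm_num [show PySem.Int.floordiv (5:Int) 3 = 1 from by decide,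
                  show columnTable.get? (5:Int) = some (5,13,20) from by decide]
      · rw [show millTable.filter (fun m => m.contains (6:Int)) = [[6,7,8],[6,11,15]] from by decide,
            loopF_two r v 6 7 8 6 11 15 hc (by norm_num)]
        norm_num [show PySem.Int.floordiv (6:Int) 3 = 2 from by decide,
                  show columnTable.get? (6:Int) = some (6,11,15) from by decide]
      · rw [show millTable.filter (fun m => m.contains (7:Int)) = [[6,7,8],[1,4,7]] from by decide,
            loopF_two r v 6 7 8 1 4 7 hc (by norm_num)]
        norm_num [show PySem.Int.floordiv (7:Int) 3 = 2 from by decide,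
                  show columnTable.get? (7:Int) = some (1,4,7) from by decide]
      · rw [show millTable.filter (fun m => m.contains (8:Int)) = [[6,7,8],[8,12,17]] from by decide,
            loopF_two r v 6 7 8 8 12 17 hc (by norm_num)]
        norm_num [show PySem.Int.floordiv (8:Int) 3 = 2 from by decide,
                  show columnTable.get? (8:Int) = some (8,12,17) from by decide]
      · rw [show millTable.filter (fun m => m.contains (9:Int)) = [[9,10,11],[0,9,21]] from by decide,
            loopF_two r v 9 10 11 0 9 21 hc (by norm_num)]
        norm_num [show PySem.Int.floordiv (9:Int) 3 = 3 from by decide,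
                  show columnTable.get? (9:Int) = some (0,9,21) from by decide]
      · rw [show millTable.filter (fun m => m.contains (10:Int)) = [[9,10,11],[3,10,18]] from by decide,
            loopF_two r v 9 10 11 3 10 18 hc (by norm_num)]
        norm_num [show PySem.Int.floordiv (10:Int) 3 = 3 from by decide,
                  show columnTable.get? (10:Int) = some (3,10,18) from by decide]
      · rw [show millTable.filter (fun m => m.contains (11:Int)) = [[9,10,11],[6,11,15]] from by decide,
            loopF_two r v 9 10 11 6 11 15 hc (by norm_num)]
        norm_num [show PySem.Int.floordiv (11:Int) 3 = 3 from by decide,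
                  show columnTable.get? (11:Int) = some (6,11,15) from by decide]
      · rw [show millTable.filter (fun m => m.contains (12:Int)) = [[12,13,14],[8,12,17]] from by decide,
            loopF_two r v 12 13 14 8 12 17 hc (by norm_num)]
        norm_num [show PySem.Int.floordiv (12:Int) 3 = 4 from by decide,
                  show columnTable.get? (12:Int) = some (8,12,17) from by decide]
      · rw [show millTable.filter (fun m => m.contains (13:Int)) = [[12,13,14],[5,13,20]] from by decide,
            loopF_two r v 12 13 14 5 13 20 hc (by norm_num)]
        norm_num [show PySem.Int.floordiv (13:Int) 3 = 4 from by decide,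
                  show columnTable.get? (13:Int) = some (5,13,20) from by decide]
      · rw [show millTable.filter (fun m => m.contains (14:Int)) = [[12,13,14],[2,14,23]] from by decide,
            loopF_two r v 12 13 14 2 14 23 hc (by norm_num)]
        norm_num [show PySem.Int.floordiv (14:Int) 3 = 4 from by decide,
                  show columnTable.get? (14:Int) = some (2,14,23) from by decide]
      · rw [show millTable.filter (fun m => m.contains (15:Int)) = [[15,16,17],[6,11,15]] from by decide,
            loopF_two r v 15 16 17 6 11 15 hc (by norm_num)]
        norm_num [show PySem.Int.floordiv (15:Int) 3 = 5 from by decide,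
                  show columnTable.get? (15:Int) = some (6,11,15) from by decide]
      · rw [show millTable.filter (fun m => m.contains (16:Int)) = [[15,16,17],[16,19,22]] from by decide,
            loopF_two r v 15 16 17 16 19 22 hc (by norm_num)]
        norm_num [show PySem.Int.floordiv (16:Int) 3 = 5 from by decide,
                  show columnTable.get? (16:Int) = some (16,19,22) from by decide]
      · rw [show millTable.filter (fun m => m.contains (17:Int)) = [[15,16,17],[8,12,17]] from by decide,
            loopF_two r v 15 16 17 8 12 17 hc (by norm_num)]
        norm_num [show PySem.Int.floordiv (17:Int) 3 = 5 from by decide,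
                  show columnTable.get? (17:Int) = some (8,12,17) from by decide]
      · rw [show millTable.filter (fun m => m.contains (18:Int)) = [[18,19,20],[3,10,18]] from by decide,
            loopF_two r v 18 19 20 3 10 18 hc (by norm_num)]
        norm_num [show PySem.Int.floordiv (18:Int) 3 = 6 from by decide,
                  show columnTable.get? (18:Int) = some (3,10,18) from by decide]
      · rw [show millTable.filter (fun m => m.contains (19:Int)) = [[18,19,20],[16,19,22]] from by decide,
            loopF_two r v 18 19 20 16 19 22 hc (by norm_num)]
        norm_num [show PySem.Int.floordiv (19:Int) 3 = 6 from by decide,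
                  show columnTable.get? (19:Int) = some (16,19,22) from by decide]
      · rw [show millTable.filter (fun m => m.contains (20:Int)) = [[18,19,20],[5,13,20]] from by decide,
            loopF_two r v 18 19 20 5 13 20 hc (by norm_num)]
        norm_num [show PySem.Int.floordiv (20:Int) 3 = 6 from by decide,
                  show columnTable.get? (20:Int) = some (5,13,20) from by decide]
      · rw [show millTable.filter (fun m => m.contains (21:Int)) = [[21,22,23],[0,9,21]] from by decide,
            loopF_two r v 21 22 23 0 9 21 hc (by norm_num)]
        norm_num [show PySem.Int.floordiv (21:Int) 3 = 7 from by decide,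
                  show columnTable.get? (21:Int) = some (0,9,21) from by decide]
      · rw [show millTable.filter (fun m => m.contains (22:Int)) = [[21,22,23],[16,19,22]] from by decide,
            loopF_two r v 21 22 23 16 19 22 hc (by norm_num)]
        norm_num [show PySem.Int.floordiv (22:Int) 3 = 7 from by decide,
                  show columnTable.get? (22:Int) = some (16,19,22) from by decide]
      · rw [show millTable.filter (fun m => m.contains (23:Int)) = [[21,22,23],[2,14,23]] from by decide,
            loopF_two r v 21 22 23 2 14 23 hc (by norm_num)]
        norm_num [show PySem.Int.floordiv (23:Int) 3 = 7 from by decide,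
                  show columnTable.get? (23:Int) = some (2,14,23) from by decide]
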